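-- pv_equiv track=rewrite | github.com/rajupeta/AI-Governance-Pod-Enterprise-AI-Audit-Platform | backend/agents/bias_agent.py | _calculate_discrimination_risk
-- ===== SOURCE A (Python) =====
-- from typing import Dict, Any, List
--
-- def _calculate_discrimination_risk(discrimination_risks: Dict) -> str:
--     risk_levels = [risk['risk_level'] for risk in discrimination_risks.values()]
--     if 'high' in risk_levels:
--         return 'high'
--     elif 'medium' in risk_levels:
--         return 'medium'
--     else:
--         return 'low'
-- ===== SOURCE B (Python) =====
-- _RANK = {'high': 2, 'medium': 1}
-- _LEVELS = ('low', 'medium', 'high')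
--
-- def _calculate_discrimination_risk(discrimination_risks):
--     best = 0
--     for risk in discrimination_risks.values():
--         best = max(best, _RANK.get(risk['risk_level'], 0))
--     return _LEVELS[best]
-- ===== Notes on version B (the rewrite author's own statement) =====
-- stated objective: alternative
-- what changed: Replaces the materialised level list with priority membership checks by an ordinal encoding: each level is mapped to a numeric severity rank (high=2, medium=1, unknown=0), the maximum rank is folded over the values, and the result is read back from a severity table.
import Mathlib
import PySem

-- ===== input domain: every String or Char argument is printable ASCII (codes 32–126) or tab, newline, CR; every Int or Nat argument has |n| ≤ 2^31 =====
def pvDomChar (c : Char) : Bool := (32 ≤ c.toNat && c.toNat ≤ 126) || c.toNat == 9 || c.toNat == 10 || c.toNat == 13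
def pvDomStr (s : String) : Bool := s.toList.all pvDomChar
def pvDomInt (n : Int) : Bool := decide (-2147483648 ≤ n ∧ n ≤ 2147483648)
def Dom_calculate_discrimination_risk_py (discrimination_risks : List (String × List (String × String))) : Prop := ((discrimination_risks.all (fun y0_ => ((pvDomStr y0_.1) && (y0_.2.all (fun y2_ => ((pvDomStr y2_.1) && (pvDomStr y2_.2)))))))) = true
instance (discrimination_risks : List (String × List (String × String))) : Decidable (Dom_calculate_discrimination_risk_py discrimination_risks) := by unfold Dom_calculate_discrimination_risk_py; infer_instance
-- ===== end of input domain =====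

-- B replaces A's level list plus priority membership checks by an ordinal encoding: fold the max numeric severity rank, then index a severity table (alternative decomposition, same cost).


-- risk['risk_level'] for one inner dict; under Pre_ the lookup is some, so getD never supplies the default
def pvRiskLevel (risk : List (String × String)) : String :=
  ((PySem.Dict.ofList risk).get? "risk_level").getD ""

-- ===== PORT A =====
def calculate_discrimination_risk_py (discrimination_risks : List (String × List (String × String))) : String :=
  let risk_levels := (PySem.Dict.ofList discrimination_risks).values.map pvRiskLevel
  if "high" ∈ risk_levels then "high"
  else if "medium" ∈ risk_levels then "medium"
  else "low"

-- ===== PORT B =====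
-- _RANK.get(level, 0) on the two-entry literal dict
def pvRankGet (level : String) : Nat :=
  (PySem.Dict.ofList [("high", 2), ("medium", 1)]).getD level 0

def calculate_discrimination_risk_py_alt (discrimination_risks : List (String × List (String × String))) : String :=
  let best := (PySem.Dict.ofList discrimination_risks).values.foldl
    (fun (best : Nat) risk => max best (pvRankGet (pvRiskLevel risk))) 0
  ["low", "medium", "high"].getD best "low"

-- ===== PRECONDITION & SPEC =====
-- Pre_ excludes inputs where some surviving inner dict lacks the 'risk_level' key: Python A raises KeyError there.
def Pre_calculate_discrimination_risk_py (discrimination_risks : List (String × List (String × String))) : Prop :=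
  ∀ v ∈ (PySem.Dict.ofList discrimination_risks).values,
    ((PySem.Dict.ofList v).get? "risk_level").isSome = true
instance (discrimination_risks : List (String × List (String × String))) : Decidable (Pre_calculate_discrimination_risk_py discrimination_risks) := by unfold Pre_calculate_discrimination_risk_py; infer_instance
def pvWitness_calculate_discrimination_risk_py : (List (String × List (String × String))) := [("gender", [("risk_level", "medium")])]
def Spec_calculate_discrimination_risk_py (discrimination_risks : List (String × List (String × String))) (out : String) : Prop := out = calculate_discrimination_risk_py_alt discrimination_risks
instance (discrimination_risks : List (String × List (String × String))) (out : String) : Decidable (Spec_calculate_discrimination_risk_py discrimination_risks out) := by unfold Spec_calculate_discrimination_risk_py; infer_instance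

-- ===== CLAIM (what is proved, stated in full; the proofs are below) =====
def Claim_equal_calculate_discrimination_risk_py : Prop := ∀ (discrimination_risks : List (String × List (String × String))), Dom_calculate_discrimination_risk_py discrimination_risks → Pre_calculate_discrimination_risk_py discrimination_risks → Spec_calculate_discrimination_risk_py discrimination_risks (calculate_discrimination_risk_py discrimination_risks)

-- ===== LEMMAS AND PROOFS =====
theorem pvRankGet_eq (level : String) :
    pvRankGet level = if level = "high" then 2 else if level = "medium" then 1 else 0 := by
  have hitems : (PySem.Dict.ofList [("high", (2:Nat)), ("medium", 1)]).items
      = [("high", 2), ("medium", 1)] := by rfl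
  simp only [pvRankGet, PySem.Dict.getD, PySem.Dict.get?, hitems, List.find?]
  by_cases h1 : level = "high" <;> by_cases h2 : level = "medium"
  · simp [h1]
  · simp [h1]
  · simp [h2]
  · have e1 : ("high" == level) = false := beq_eq_false_iff_ne.mpr fun h => h1 h.symm
    have e2 : ("medium" == level) = false := beq_eq_false_iff_ne.mpr fun h => h2 h.symm
    simp [e1, e2, h1, h2]

theorem pvFold_max_shift (vs : List (List (String × String))) (a : Nat) :
    vs.foldl (fun best risk => max best (pvRankGet (pvRiskLevel risk))) a
      = max a (vs.foldl (fun best risk => max best (pvRankGet (pvRiskLevel risk))) 0) := by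
  induction vs generalizing a with
  | nil => simp
  | cons v t ih =>
    simp only [List.foldl_cons]
    rw [ih, ih (max 0 _)]
    simp [Nat.max_assoc]

theorem pvFold_max_char (vs : List (List (String × String))) :
    vs.foldl (fun best risk => max best (pvRankGet (pvRiskLevel risk))) 0
      = if vs.any (fun v => pvRiskLevel v == "high") then 2
        else if vs.any (fun v => pvRiskLevel v == "medium") then 1 else 0 := by
  induction vs with
  | nil => simp
  | cons v t ih =>
    simp only [List.foldl_cons, List.any_cons]
    rw [pvFold_max_shift, ih, pvRankGet_eq]
    by_cases h1 : pvRiskLevel v = "high" <;> by_cases h2 : pvRiskLevel v = "medium" <;>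
      simp [h1, h2] <;> split_ifs <;> simp_all

theorem pvMem_map_any (vs : List (List (String × String))) (s : String) :
    (s ∈ vs.map pvRiskLevel) ↔ vs.any (fun v => pvRiskLevel v == s) = true := by
  simp only [List.mem_map, List.any_eq_true, beq_iff_eq]

-- ===== VERDICT (by name: the statement is the Claim_ definition above) =====
theorem calculate_discrimination_risk_py_spec : Claim_equal_calculate_discrimination_risk_py := by
  intro d _ _
  unfold Spec_calculate_discrimination_risk_py
  unfold calculate_discrimination_risk_py calculate_discrimination_risk_py_alt
  simp only [pvFold_max_char, pvMem_map_any]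
  split_ifs <;> simp_all
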